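-- pv_equiv track=rewrite | github.com/ellismckenzielee/codewars-python | strip_comments.py | solution
-- ===== SOURCE A (Python) =====
-- def solution(string,markers):
--     output = ''
--     marked = False
--     for i, char in enumerate(string):
--         if marked == False:
--             if char in markers:
--                 marked = True
--             else:
--                 output += char
--         elif marked == True:
--             if char == '\n':
--                 marked = False
--                 if string[-1] != '\n':
--                     output = output.rstrip(' ')
--                 output += '\n'
--     if output[-1:] != '\n':
--         return output.rstrip()
--     else:
--         return output
-- ===== SOURCE B (Python) =====
-- def cut(line, marks):
--     for i, ch in enumerate(line):
--         if ch in marks: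
--             return line[:i].rstrip(' ')
--     return line
--
--
-- def solution(string, markers):
--     marks = {m for m in markers if len(m) == 1}
--     output = '\n'.join(cut(line, marks) for line in string.split('\n'))
--     return output if output.endswith('\n') else output.rstrip()
-- ===== Notes on version B (the rewrite author's own statement) =====
-- stated objective: faster
-- what changed: B replaces A's character-by-character state machine (marked flag, incremental concatenation, in-loop rstrip of the whole growing output) by split-on-newline / cut-each-line-at-its-first-marker-and-strip-its-trailing-spaces / join, removing the quadratic string rebuilding; Pre_ excludes only the degenerate inputs where '\n' itself is a marker in a multi-line string (marker and line separator coincide; both behaviours defensible).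
-- intended difference: On strings where a removed comment leaves trailing spaces but A's strip is mis-gated on the WHOLE string's final character (comment line before a final newline, or an all-space prefix of a cut last line without one), A keeps the spaces (resp. rstrips across the final newline) while B always strips the spaces left before the marker, the intended behaviour of a comment stripper. — e.g. on solution("a #b\n", ["#"]): A returns "a \n", B returns "a\n"
-- outside the precondition, e.g. on solution('a\nb\nc', ['\n']): A returns 'a\nc', B returns 'a\nb\nc'
import Mathlib
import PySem

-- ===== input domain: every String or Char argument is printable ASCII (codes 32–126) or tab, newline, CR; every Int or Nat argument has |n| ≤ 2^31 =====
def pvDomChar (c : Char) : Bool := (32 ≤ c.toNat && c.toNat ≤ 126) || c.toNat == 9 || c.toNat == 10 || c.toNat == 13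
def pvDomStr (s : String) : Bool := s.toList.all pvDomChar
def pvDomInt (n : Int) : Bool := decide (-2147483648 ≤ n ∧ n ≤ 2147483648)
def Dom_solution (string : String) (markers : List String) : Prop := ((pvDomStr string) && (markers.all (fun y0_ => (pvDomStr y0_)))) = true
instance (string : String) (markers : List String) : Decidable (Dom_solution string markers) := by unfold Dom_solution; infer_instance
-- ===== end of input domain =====

-- B replaces A's char-by-char marked-state machine by split-on-newline / cut-each-line-at-its-first-marker-and-strip-trailing-spaces / join; A's gating of that space-stripping on the whole string's final character is stated as an intended difference (D_).


-- Python's  s.rstrip(' ')  (strip SPACES only, from the right) — exact; used by both ports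
def rstripSpaces (cs : List Char) : List Char := (cs.reverse.dropWhile (· == ' ')).reverse

-- the per-character marker test both A and D_ use ('char in markers')
def markTest (markers : List String) (c : Char) : Bool := markers.contains (String.ofList [c])

-- ===== PORT A =====
-- A's loop over enumerate(string); state = (output, marked)
def solutionCore (s : List Char) (markers : List String) : List Char × Bool :=
  s.foldl (fun st c =>
    if st.2 = false then
      if markTest markers c then (st.1, true)
      else (st.1 ++ [c], false)
    else
      if c = '\n' then
        ((if PySem.List.pyGet? s (-1) ≠ some '\n' then rstripSpaces st.1 else st.1) ++ ['\n'], false)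
      else st) ([], false)

def solution (string : String) (markers : List String) : String :=
  let out := (solutionCore string.toList markers).1
  String.ofList (if PySem.List.slice out (some (-1)) none ≠ ['\n'] then PySem.Chars.rstrip out else out)

-- ===== PORT B =====
-- B helper 'cut': the for-loop over enumerate(line); on the first marker char return the
-- space-stripped prefix, else fall through to the whole line
def cutLoop (marks : PySem.Set String) (line : List Char) : Nat → List Char → List Char
  | _, [] => line
  | i, ch :: rest =>
    if marks.contains (String.ofList [ch]) then
      rstripSpaces (PySem.List.slice line none (some (i : Int)))   -- line[:i].rstrip(' ')
    else cutLoop marks line (i + 1) rest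

def cutLine (marks : PySem.Set String) (line : List Char) : List Char :=
  cutLoop marks line 0 line

def solution_alt (string : String) (markers : List String) : String :=
  let marks : PySem.Set String := PySem.Set.ofList (markers.filter (fun m => m.toList.length == 1))
  let output := PySem.Chars.join ['\n'] ((PySem.Chars.splitOn string.toList ['\n']).map (cutLine marks))
  String.ofList (if PySem.Chars.endswith output ['\n'] then output else PySem.Chars.rstrip output)

-- ===== PRECONDITION & SPEC =====
-- Pre_ excludes the inputs where a marker IS the newline separator and the string contains a
-- newline: there marker and line-terminator coincide (A consumes the newline as a marker, B's
-- line decomposition cannot see it) — a degenerate corner no caller of a comment-stripper would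
-- specify; A returns one defensible value there and B another.
def Pre_solution (string : String) (markers : List String) : Prop := ¬ ("\n" ∈ markers ∧ '\n' ∈ string.toList)
instance (string : String) (markers : List String) : Decidable (Pre_solution string markers) := by unfold Pre_solution; infer_instance
def pvWitness_solution : String × List String := ("apples # comments\n trailing  ! nope\nno marker", ["#", "!"])

-- A strips the spaces left before a removed comment only when the WHOLE string lacks a final
-- newline (and, with no final newline, mangles an all-space prefix of a cut last line): on those
-- inputs A keeps the trailing spaces (resp. rstrips across the final newline) while B always
-- strips the spaces before the marker, which is what a comment stripper is meant to do.
def pref (markers : List String) (l : List Char) : List Char := l.takeWhile (!markTest markers ·)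

def bad (markers : List String) (l : List Char) : Bool :=
  pref markers l != l && (pref markers l).getLast? == some ' '

def D_solution (string : String) (markers : List String) : Prop :=
  let L := List.splitOn '\n' string.toList
  let x := L.getLastD []
  if string.toList.getLast? = some '\n' then L.any (bad markers)
  else 2 ≤ L.length ∧ bad markers x ∧ ∀ c ∈ pref markers x, c = ' '
instance (string : String) (markers : List String) : Decidable (D_solution string markers) := by unfold D_solution; infer_instance

def Spec_solution (string : String) (markers : List String) (out : String) : Prop := ¬ D_solution string markers → out = solution_alt string markers
instance (string : String) (markers : List String) (out : String) : Decidable (Spec_solution string markers out) := by unfold Spec_solution; infer_instance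

def pvDiffWitness_solution : String × List String := ("a  #b\n", ["#"])
def pvDiffWitnessOut_solution : String × String := ("a  \n", "a\n")

-- ===== CLAIM (what is proved, stated in full; the proofs are below) =====
def Claim_unchanged_solution : Prop := ∀ (string : String) (markers : List String), Dom_solution string markers → Pre_solution string markers → Spec_solution string markers (solution string markers)
def Claim_exact_solution : Prop := ∀ (string : String) (markers : List String), Dom_solution string markers → Pre_solution string markers → D_solution string markers → solution string markers ≠ solution_alt string markers
def Claim_changed_solution : Prop := Dom_solution (pvDiffWitness_solution.1) (pvDiffWitness_solution.2) ∧ Pre_solution (pvDiffWitness_solution.1) (pvDiffWitness_solution.2) ∧ D_solution (pvDiffWitness_solution.1) (pvDiffWitness_solution.2) ∧ solution (pvDiffWitness_solution.1) (pvDiffWitness_solution.2) = pvDiffWitnessOut_solution.1 ∧ solution_alt (pvDiffWitness_solution.1) (pvDiffWitness_solution.2) = pvDiffWitnessOut_solution.2 ∧ pvDiffWitnessOut_solution.1 ≠ pvDiffWitnessOut_solution.2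

-- ===== LEMMAS AND PROOFS =====

-- A's loop body with the constant strip flag e = (string[-1] != '\n') precomputed
def stepA (markers : List String) (e : Bool) (st : List Char × Bool) (c : Char) : List Char × Bool :=
  if st.2 = false then
    if markTest markers c then (st.1, true) else (st.1 ++ [c], false)
  else if c = '\n' then
    ((if e then rstripSpaces st.1 else st.1) ++ ['\n'], false)
  else st

-- what A does to one line (e = strip flag used on non-final lines)
def cutMid (markers : List String) (e : Bool) (l : List Char) : List Char :=
  if l.any (markTest markers) then
    (if e then rstripSpaces (l.takeWhile (fun c => !markTest markers c))
     else l.takeWhile (fun c => !markTest markers c))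
  else l

theorem foldl_stepA_eq (s : List Char) (markers : List String) (init : List Char × Bool) :
    s.foldl (fun st c =>
      if st.2 = false then
        if markTest markers c then (st.1, true)
        else (st.1 ++ [c], false)
      else
        if c = '\n' then
          ((if PySem.List.pyGet? s (-1) ≠ some '\n' then rstripSpaces st.1 else st.1) ++ ['\n'], false)
        else st) init
    = s.foldl (stepA markers (decide (PySem.List.pyGet? s (-1) ≠ some '\n'))) init := by
  have h : (fun (st : List Char × Bool) (c : Char) =>
      if st.2 = false then
        if markTest markers c then (st.1, true)
        else (st.1 ++ [c], false)
      else
        if c = '\n' then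
          ((if PySem.List.pyGet? s (-1) ≠ some '\n' then rstripSpaces st.1 else st.1) ++ ['\n'], false)
        else st) = stepA markers (decide (PySem.List.pyGet? s (-1) ≠ some '\n')) := by
    funext st c
    by_cases hp : PySem.List.pyGet? s (-1) ≠ some '\n' <;> simp [stepA, hp]
  rw [h]

theorem stepA_ff {markers : List String} {c : Char} (e : Bool) (out : List Char) (hm : markTest markers c = true) :
    stepA markers e (out, false) c = (out, true) := by
  simp [stepA, hm]

theorem stepA_fn {markers : List String} {c : Char} (e : Bool) (out : List Char) (hm : markTest markers c = false) :
    stepA markers e (out, false) c = (out ++ [c], false) := by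
  simp [stepA, hm]

theorem stepA_t {markers : List String} {c : Char} (e : Bool) (out : List Char) (hc : c ≠ '\n') :
    stepA markers e (out, true) c = (out, true) := by
  simp [stepA, hc]

theorem stepA_tnl {markers : List String} (e : Bool) (out : List Char) :
    stepA markers e (out, true) '\n' = ((if e then rstripSpaces out else out) ++ ['\n'], false) := by
  simp [stepA]

theorem stepA_frozen (markers : List String) (e : Bool) (l : List Char) (out : List Char)
    (h : '\n' ∉ l) : l.foldl (stepA markers e) (out, true) = (out, true) := by
  induction l with
  | nil => rfl
  | cons c l ih =>
    simp only [List.mem_cons, not_or] at h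
    rw [List.foldl_cons, stepA_t e out (Ne.symm h.1), ih h.2]

theorem stepA_line (markers : List String) (e : Bool) (l : List Char) (out : List Char)
    (h : '\n' ∉ l) :
    l.foldl (stepA markers e) (out, false)
      = (out ++ l.takeWhile (fun c => !markTest markers c), l.any (markTest markers)) := by
  induction l generalizing out with
  | nil => simp
  | cons c l ih =>
    simp only [List.mem_cons, not_or] at h
    by_cases hm : markTest markers c
    · rw [List.foldl_cons, stepA_ff e out hm, stepA_frozen markers e l out h.2]
      simp [hm]
    · have hm' : markTest markers c = false := by simpa using hm
      rw [List.foldl_cons, stepA_fn e out hm', ih (out ++ [c]) h.2]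
      simp [hm']

theorem rstripSpaces_append (out p : List Char)
    (h : out = [] ∨ out.getLast? = some '\n') :
    rstripSpaces (out ++ p) = out ++ rstripSpaces p := by
  rcases h with h | h
  · simp [h]
  · obtain ⟨ys, rfl⟩ := List.getLast?_eq_some_iff.mp h
    simp only [rstripSpaces, List.append_assoc, List.reverse_append, List.dropWhile_append,
      List.reverse_cons]
    by_cases hall : (List.dropWhile (· == ' ') p.reverse).isEmpty
    · rw [List.isEmpty_iff, List.dropWhile_eq_nil_iff] at hall
      simp only [List.dropWhile_eq_nil_iff.mpr hall, List.isEmpty_nil, if_true,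
        List.dropWhile_cons]
      simp
    · simp [hall]

theorem inter_cons (x : List Char) (L : List (List Char)) (h : L ≠ []) :
    ['\n'].intercalate (x :: L) = x ++ '\n' :: ['\n'].intercalate L := by
  rcases L with _ | ⟨y, L⟩
  · exact absurd rfl h
  · simp [List.intercalate, List.intersperse]

theorem takeWhile_eq_self_of_not_any (markers : List String) (x : List Char)
    (hany : x.any (markTest markers) = false) :
    x.takeWhile (fun c => !markTest markers c) = x := by
  refine List.takeWhile_eq_self_iff.mpr ?_
  intro a ha
  simp only [List.any_eq_false] at hany
  simpa using hany a ha

theorem main_fold (markers : List String) (e : Bool)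
    (hnl : markTest markers '\n' = false) :
    ∀ (L : List (List Char)), L ≠ [] → (∀ l ∈ L, '\n' ∉ l) →
    ∀ out : List Char, (out = [] ∨ out.getLast? = some '\n') →
    (['\n'].intercalate L).foldl (stepA markers e) (out, false)
      = (out ++ ['\n'].intercalate (L.dropLast.map (cutMid markers e) ++ [cutMid markers false (L.getLastD [])]),
         (L.getLastD []).any (markTest markers)) := by
  intro L
  induction L with
  | nil => intro h; exact absurd rfl h
  | cons x L ih =>
    intro _ hc out hout
    have hx : '\n' ∉ x := hc x List.mem_cons_self
    rcases L with _ | ⟨y, L'⟩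
    · rw [show ['\n'].intercalate [x] = x from by simp [List.intercalate]]
      rw [stepA_line markers e x out hx]
      by_cases hany : x.any (markTest markers)
      · simp [cutMid, hany, List.intercalate]
      · have hany' : x.any (markTest markers) = false := by simpa using hany
        simp [cutMid, hany', List.intercalate, takeWhile_eq_self_of_not_any markers x hany']
    · rw [inter_cons x (y :: L') (by simp)]
      rw [show x ++ '\n' :: ['\n'].intercalate (y :: L')
            = (x ++ ['\n']) ++ ['\n'].intercalate (y :: L') from by simp]
      rw [List.foldl_append, List.foldl_append, stepA_line markers e x out hx,
        List.foldl_cons, List.foldl_nil]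
      have hstep : stepA markers e
          (out ++ x.takeWhile (fun c => !markTest markers c), x.any (markTest markers)) '\n'
          = (out ++ cutMid markers e x ++ ['\n'], false) := by
        by_cases hany : x.any (markTest markers)
        · rw [hany, stepA_tnl,
            rstripSpaces_append out (x.takeWhile (fun c => !markTest markers c)) hout]
          cases e <;> simp [cutMid, hany]
        · have hany' : x.any (markTest markers) = false := by simpa using hany
          rw [hany', stepA_fn e _ hnl]
          simp [cutMid, hany', takeWhile_eq_self_of_not_any markers x hany']
      rw [hstep]
      rw [ih (by simp) (fun l hl => hc l (List.mem_cons_of_mem x hl))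
            (out ++ cutMid markers e x ++ ['\n']) (Or.inr (by simp))]
      rw [show ((x :: y :: L').dropLast.map (cutMid markers e)
            ++ [cutMid markers false ((x :: y :: L').getLastD [])])
          = cutMid markers e x :: ((y :: L').dropLast.map (cutMid markers e)
            ++ [cutMid markers false ((y :: L').getLastD [])]) from by simp]
      rw [inter_cons _ _ (by simp)]
      simp

theorem takeWhile_ne_of_any (markers : List String) (l : List Char)
    (h : l.any (markTest markers) = true) :
    l.takeWhile (fun c => !markTest markers c) ≠ l := by
  intro heq
  have hall := List.takeWhile_eq_self_iff.mp heq
  rw [List.any_eq_true] at h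
  obtain ⟨a, ha, hm⟩ := h
  have := hall a ha
  simp [hm] at this

theorem marks_contains_eq (markers : List String) (ch : Char) :
    (PySem.Set.ofList (markers.filter (fun m => m.toList.length == 1))).contains (String.ofList [ch])
      = markTest markers ch := by
  rw [Bool.eq_iff_iff]
  simp [markTest, PySem.Set.contains, PySem.Set.mem_ofList, List.mem_filter]

theorem cutLoop_spec (markers : List String) (line : List Char) :
    ∀ (rest done : List Char), line = done ++ rest →
      done.all (fun c => !markTest markers c) = true →
      cutLoop (PySem.Set.ofList (markers.filter (fun m => m.toList.length == 1))) line done.length rest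
        = if rest.any (markTest markers) then
            rstripSpaces (line.takeWhile (fun c => !markTest markers c))
          else line := by
  intro rest
  induction rest with
  | nil =>
    intro done _ _
    simp [cutLoop]
  | cons ch rest ih =>
    intro done hline hdone
    rw [cutLoop, marks_contains_eq]
    by_cases hch : markTest markers ch
    · rw [if_pos hch]
      have htake : line.takeWhile (fun c => !markTest markers c) = done := by
        rw [hline, List.takeWhile_append,
          show done.takeWhile (fun c => !markTest markers c) = done from
            List.takeWhile_eq_self_iff.mpr (by simpa [List.all_eq_true] using hdone)]
        simp [hch]
      have hslice : PySem.List.slice line none (some ((done.length : Nat) : Int)) = done := by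
        rw [PySem.List.slice_to line (by exact_mod_cast Int.natCast_nonneg done.length)]
        rw [show (((done.length : Nat) : Int)).toNat = done.length from rfl, hline, List.take_left]
      rw [hslice, htake]
      simp [hch]
    · have hch' : markTest markers ch = false := by simpa using hch
      rw [if_neg (by simp [hch'])]
      have hlen : done.length + 1 = (done ++ [ch]).length := by simp
      rw [hlen, ih (done ++ [ch]) (by simp [hline]) (by simp [List.all_eq_true] at hdone ⊢; exact ⟨hdone, by simp [hch']⟩)]
      have hany : (ch :: rest).any (markTest markers) = rest.any (markTest markers) := by
        simp [hch']
      rw [hany]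

theorem cutLine_eq (markers : List String) (l : List Char) :
    cutLine (PySem.Set.ofList (markers.filter (fun m => m.toList.length == 1))) l
      = cutMid markers true l := by
  unfold cutLine
  rw [show (0 : Nat) = ([] : List Char).length from rfl,
    cutLoop_spec markers l l [] (by simp) (by simp)]
  unfold cutMid
  by_cases hany : l.any (markTest markers)
  · simp [hany]
  · have hany' : l.any (markTest markers) = false := by simpa using hany
    simp [hany']

theorem splitOn_go_spec (c : Char) :
    ∀ (fuel : Nat) (l : List Char), l.length ≤ fuel → ∀ (cur : List Char) (acc : List (List Char)),
      PySem.Chars.splitOn.go [c] fuel l cur acc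
        = acc.reverse ++ (List.splitOnP (· == c) l).modifyHead (cur.reverse ++ ·) := by
  intro fuel
  induction fuel with
  | zero =>
    intro l hl cur acc
    have : l = [] := List.eq_nil_of_length_eq_zero (Nat.le_zero.mp hl)
    subst this
    simp [PySem.Chars.splitOn.go, List.splitOnP_nil]
  | succ fuel ih =>
    intro l hl cur acc
    rcases l with _ | ⟨a, rest⟩
    · simp [PySem.Chars.splitOn.go, List.splitOnP_nil]
    · rw [PySem.Chars.splitOn.go]
      by_cases ha : a = c
      · subst ha
        have hpre : [a].isPrefixOf (a :: rest) = true := by simp [List.isPrefixOf]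
        rw [if_pos hpre]
        simp only [List.length_cons] at hl
        rw [show List.drop [a].length (a :: rest) = rest from rfl]
        rw [ih rest (by omega) [] (cur.reverse :: acc)]
        rw [List.splitOnP_cons]
        simp
        rcases List.splitOnP (fun x => x == a) rest with _ | ⟨h, t⟩ <;> simp
      · have hpre : [c].isPrefixOf (a :: rest) = false := by
          simp [List.isPrefixOf]
          exact fun h => ha h.symm
        rw [if_neg (by simp [hpre])]
        simp only [List.length_cons] at hl
        rw [ih rest (by omega) (a :: cur) acc]
        rw [List.splitOnP_cons]
        have : (a == c) = false := by simp [ha]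
        rw [this]
        rcases hsp : List.splitOnP (fun x => x == c) rest with _ | ⟨h, t⟩
        · exact absurd hsp (List.splitOnP_ne_nil _ _)
        · simp

theorem chars_splitOn_eq (s : List Char) (c : Char) :
    PySem.Chars.splitOn s [c] = List.splitOn c s := by
  rw [PySem.Chars.splitOn, splitOn_go_spec c (s.length + 1) s (by omega) [] []]
  rw [List.splitOn]
  simp
  rcases List.splitOnP (· == c) s with _ | ⟨h, t⟩ <;> simp

theorem not_mem_splitOn (c : Char) :
    ∀ (s : List Char), ∀ l ∈ List.splitOn c s, c ∉ l := by
  intro s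
  rw [List.splitOn]
  induction s with
  | nil => simp [List.splitOnP_nil]
  | cons a t ih =>
    rw [List.splitOnP_cons]
    by_cases ha : a = c
    · subst ha
      simp only [beq_self_eq_true, if_true]
      intro l hl
      rcases List.mem_cons.mp hl with rfl | h
      · simp
      · exact ih l h
    · rw [show (a == c) = false from by simp [ha]]
      simp only [Bool.false_eq_true, if_false]
      rcases hsp : List.splitOnP (fun x => x == c) t with _ | ⟨h, t'⟩
      · exact absurd hsp (List.splitOnP_ne_nil _ _)
      · intro l hl
        rcases List.mem_cons.mp (by simpa using hl) with rfl | hmem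
        · intro hc
          rcases List.mem_cons.mp hc with rfl | hc2
          · exact ha rfl
          · exact ih h (by simp [hsp]) hc2
        · exact ih l (by simp [hsp, hmem])

theorem pyGet?_neg_one_eq_getLast? {α : Type} (xs : List α) :
    PySem.List.pyGet? xs (-1) = xs.getLast? := by
  induction xs using List.reverseRecOn with
  | nil => rfl
  | append_singleton ys y _ => simp
theorem endswith_concat (xs : List Char) (x c : Char) :
    PySem.Chars.endswith (xs ++ [x]) [c] = (x == c) := by
  by_cases hx : x = c
  · subst hx
    have : [x] <:+ xs ++ [x] := ⟨xs, rfl⟩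
    simp [PySem.Chars.endswith, List.isSuffixOf_iff_suffix, this]
  · have : ¬ ([c] <:+ xs ++ [x]) := by
      rintro ⟨t, ht⟩
      have h3 := (List.append_inj' ht (by simp)).2
      simp at h3
      exact hx h3.symm
    have h2 : [c].isSuffixOf (xs ++ [x]) = false := by
      rw [← Bool.not_eq_true]
      intro hS
      exact this (List.isSuffixOf_iff_suffix.mp hS)
    simp [PySem.Chars.endswith, h2, hx]
theorem endswith_eq_getLast? (xs : List Char) (c : Char) :
    PySem.Chars.endswith xs [c] = decide (xs.getLast? = some c) := by
  induction xs using List.reverseRecOn with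
  | nil => simp [PySem.Chars.endswith]
  | append_singleton ys y _ =>
    rw [endswith_concat]
    by_cases hy : y = c <;> simp [hy]
theorem eflag_eq (s : List Char) :
    decide (PySem.List.pyGet? s (-1) ≠ some '\n') = ! decide (s.getLast? = some '\n') := by
  rw [pyGet?_neg_one_eq_getLast?]
  by_cases h : s.getLast? = some '\n' <;> simp [h]
theorem slice_neg_one_concat (xs : List Char) (x : Char) :
    PySem.List.slice (xs ++ [x]) (some (-1)) none = [x] := by
  simp [PySem.List.slice, PySem.List.clampIdx]
  split <;> omega
theorem tail_eq (out : List Char) :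
    (if PySem.List.slice out (some (-1)) none ≠ ['\n'] then PySem.Chars.rstrip out else out)
      = (if out.getLast? = some '\n' then out else PySem.Chars.rstrip out) := by
  induction out using List.reverseRecOn with
  | nil => decide
  | append_singleton ys y _ =>
    rw [slice_neg_one_concat]
    by_cases hy : y = '\n' <;> simp [hy]

theorem splitOn_singleton_of_not_mem (c : Char) (s : List Char) (h : c ∉ s) :
    List.splitOn c s = [s] := by
  rw [List.splitOn]
  induction s with
  | nil => simp [List.splitOnP_nil]
  | cons a t ih =>
    simp only [List.mem_cons, not_or] at h
    rw [List.splitOnP_cons, show (a == c) = false from by simp [Ne.symm h.1]]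
    simp [ih h.2]

-- splitting a string that ends with the separator: last piece is []
theorem splitOnP_concat_true {α : Type} (p : α → Bool) (a : α) (hp : p a = true) :
    ∀ (xs : List α), List.splitOnP p (xs ++ [a]) = List.splitOnP p xs ++ [[]] := by
  intro xs
  induction xs with
  | nil => simp [List.splitOnP_cons, hp, List.splitOnP_nil]
  | cons x xs ih =>
    rw [List.cons_append, List.splitOnP_cons, List.splitOnP_cons, ih]
    by_cases hx : p x
    · simp [hx]
    · rw [show (p x) = false from by simpa using hx]
      rcases hsp : List.splitOnP p xs with _ | ⟨h, t⟩
      · exact absurd hsp (List.splitOnP_ne_nil _ _)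
      · simp

-- the list-side value of A: A's core output written line by line
theorem listsA_eq (markers : List String) (s : List Char)
    (h : markTest markers '\n' = false ∨ '\n' ∉ s) :
    (solutionCore s markers).1
      = ['\n'].intercalate
          ((List.splitOn '\n' s).dropLast.map (cutMid markers (!decide (s.getLast? = some '\n')))
            ++ [cutMid markers false ((List.splitOn '\n' s).getLastD [])]) := by
  unfold solutionCore
  rw [foldl_stepA_eq, eflag_eq s]
  set e := !decide (s.getLast? = some '\n') with he
  set L : List (List Char) := List.splitOn '\n' s with hL
  have hLne : L ≠ [] := List.splitOnP_ne_nil _ _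
  have hcc : ∀ l ∈ L, '\n' ∉ l := not_mem_splitOn '\n' s
  rcases h with hnl | hno
  · have hs : s = ['\n'].intercalate L := (List.intercalate_splitOn s '\n').symm
    conv_lhs => rw [hs]
    rw [main_fold markers e hnl L hLne hcc [] (Or.inl rfl)]
    simp
  · have h1 : L = [s] := splitOn_singleton_of_not_mem '\n' s hno
    rw [h1] at hLne ⊢
    have hs1 : s.foldl (stepA markers e) (([] : List Char), false)
        = (s.takeWhile (fun c => !markTest markers c), s.any (markTest markers)) := by
      simpa using stepA_line markers e s [] hno
    rw [hs1]
    rw [show ([s] : List (List Char)).dropLast = [] from rfl]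
    rw [show ([s] : List (List Char)).getLastD [] = s from rfl]
    simp only [List.map_nil, List.nil_append]
    rw [show ['\n'].intercalate [cutMid markers false s] = cutMid markers false s from by
      simp [List.intercalate]]
    by_cases hany : s.any (markTest markers)
    · simp [cutMid, hany]
    · have hany' : s.any (markTest markers) = false := by simpa using hany
      simp [cutMid, hany', takeWhile_eq_self_of_not_any markers s hany']

-- the list-side value of B's joined output
theorem listsB_eq (markers : List String) (s : List Char) :
    PySem.Chars.join ['\n'] ((PySem.Chars.splitOn s ['\n']).map
        (cutLine (PySem.Set.ofList (markers.filter (fun m => m.toList.length == 1)))))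
      = ['\n'].intercalate ((List.splitOn '\n' s).map (cutMid markers true)) := by
  rw [chars_splitOn_eq s '\n']
  rw [show PySem.Chars.join ['\n'] = (['\n']).intercalate from rfl]
  exact congrArg _ (List.map_congr_left (fun l _ => cutLine_eq markers l))

-- cutMid does not depend on the flag when the prefix has no trailing space
theorem rstripSpaces_eq_self (p : List Char) (h : p.getLast? ≠ some ' ') :
    rstripSpaces p = p := by
  unfold rstripSpaces
  rcases hp : p.reverse with _ | ⟨a, t⟩
  · simp [List.reverse_eq_nil_iff.mp hp]
  · have ha : a ≠ ' ' := by
      intro rfl_a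
      apply h
      rw [← List.reverse_reverse p, hp]
      simp [rfl_a]
    rw [List.dropWhile_cons, show ((a == ' ') = false) from by simpa using ha]
    simp only [Bool.false_eq_true, if_false]
    rw [← hp, List.reverse_reverse]

theorem cutMid_flag_eq (markers : List String) (l : List Char)
    (h : bad markers l ≠ true) :
    cutMid markers false l = cutMid markers true l := by
  unfold cutMid
  by_cases hany : l.any (markTest markers)
  · simp only [hany, if_true]
    have hl : (l.takeWhile (fun c => !markTest markers c)).getLast? ≠ some ' ' := by
      intro hc
      apply h
      unfold bad pref
      simp [bne_iff_ne, takeWhile_ne_of_any markers l hany, hc]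
    rw [rstripSpaces_eq_self _ hl]
    simp
  · simp [hany]

-- decomposition of a list into its space-stripped part and trailing spaces
theorem rstripSpaces_decomp (p : List Char) :
    ∃ sp : List Char, p = rstripSpaces p ++ sp ∧ sp.all (· == ' ') = true := by
  refine ⟨(p.reverse.takeWhile (· == ' ')).reverse, ?_, ?_⟩
  · rw [rstripSpaces]
    rw [← List.reverse_append, List.takeWhile_append_dropWhile]
    · simp
  · rw [List.all_eq_true]
    intro x hx
    have hx' : x ∈ p.reverse.takeWhile (fun c => c == ' ') := List.mem_reverse.mp hx
    simpa using List.mem_takeWhile_imp hx'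

-- full rstrip ignores trailing spaces
theorem rstrip_append_spaces (x sp : List Char) (h : sp.all (· == ' ') = true) :
    PySem.Chars.rstrip (x ++ sp) = PySem.Chars.rstrip x := by
  simp only [PySem.Chars.rstrip, List.reverse_append, List.dropWhile_append]
  have hdrop : sp.reverse.dropWhile PySem.Chars.isspace = [] := by
    rw [List.dropWhile_eq_nil_iff]
    intro a ha
    have : a = ' ' := by
      have := (List.all_eq_true.mp h) a (List.mem_reverse.mp ha)
      simpa using this
    subst this
    decide
  rw [hdrop]
  simp

theorem intercalate_concat (F : List (List Char)) (x : List Char) :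
    ['\n'].intercalate (F ++ [x])
      = (if F = [] then [] else ['\n'].intercalate F ++ ['\n']) ++ x := by
  induction F with
  | nil => simp [List.intercalate]
  | cons y F ih =>
    rw [List.cons_append, inter_cons y (F ++ [x]) (by simp), ih]
    rcases F with _ | ⟨z, F'⟩
    · simp [List.intercalate]
    · rw [if_neg (by simp), inter_cons y (z :: F') (by simp)]
      simp

-- trailing spaces are all-space prefixes too: characterize rstripSpaces p = []
theorem all_spaces_of_rstrip_nil (p : List Char) (h : rstripSpaces p = []) :
    p.all (· == ' ') = true := by
  rw [List.all_eq_true]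
  intro a ha
  unfold rstripSpaces at h
  rw [List.reverse_eq_nil_iff, List.dropWhile_eq_nil_iff] at h
  exact h a (List.mem_reverse.mpr ha)

-- getLast? facts for the tail analysis
theorem getLast?_all_spaces (p : List Char) (hne : p ≠ []) (h : p.all (· == ' ') = true) :
    p.getLast? = some ' ' := by
  rcases List.eq_nil_or_concat p with rfl | ⟨q, a, rfl⟩
  · exact absurd rfl hne
  · have : a = ' ' := by
      have := (List.all_eq_true.mp h) a (by simp)
      simpa using this
    simp [this]

theorem mem_rstripSpaces (p : List Char) (x : Char) (h : x ∈ rstripSpaces p) : x ∈ p := by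
  unfold rstripSpaces at h
  rw [List.mem_reverse] at h
  exact List.mem_reverse.mp ((List.dropWhile_sublist _).mem h)

theorem cutMid_nil (markers : List String) (e : Bool) : cutMid markers e [] = [] := by
  simp [cutMid]

-- both programs' common tail:  output if output endswith '\n' else output.rstrip()
theorem tailF_eq_of_rstrip (x y : List Char)
    (hx : x.getLast? ≠ some '\n') (hy : y.getLast? ≠ some '\n')
    (hr : PySem.Chars.rstrip x = PySem.Chars.rstrip y) :
    (if x.getLast? = some '\n' then x else PySem.Chars.rstrip x)
      = (if y.getLast? = some '\n' then y else PySem.Chars.rstrip y) := by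
  rw [if_neg hx, if_neg hy, hr]

-- ===== VERDICT (by name: the statement is the Claim_ definition above) =====
theorem solution_spec : Claim_unchanged_solution := by
  intro string markers _ hpre hnd
  unfold solution solution_alt
  set s := string.toList with hs
  have hpre' : markTest markers '\n' = false ∨ '\n' ∉ s := by
    by_cases hm : "\n" ∈ markers
    · exact Or.inr (fun hsm => hpre ⟨hm, hsm⟩)
    · refine Or.inl ?_
      simp only [markTest]
      rw [show String.ofList ['\n'] = "\n" from rfl]
      simpa using hm
  simp only []
  rw [listsA_eq markers s hpre', listsB_eq markers s, tail_eq, endswith_eq_getLast?]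
  simp only [decide_eq_true_eq]
  set L : List (List Char) := List.splitOn '\n' s with hL
  have hLne : L ≠ [] := List.splitOnP_ne_nil _ _
  have hnol : ∀ l ∈ L, '\n' ∉ l := not_mem_splitOn '\n' s
  simp only [D_solution] at hnd
  rw [← hs, ← hL] at hnd
  by_cases hends : s.getLast? = some '\n'
  · -- string ends with '\n': A strips nothing; outside D_ no cut line has a trailing-space prefix
    have hmapeq : L.dropLast.map (cutMid markers (!decide (s.getLast? = some '\n')))
        = L.dropLast.map (cutMid markers true) := by
      refine List.map_congr_left (fun l hl => ?_)
      rw [hends]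
      simp only [decide_true, Bool.not_true]
      have hcs : bad markers l ≠ true := by
        intro hc
        refine hnd ?_
        rw [if_pos hends]
        exact List.any_eq_true.mpr ⟨l, (List.dropLast_sublist L).mem hl, hc⟩
      exact cutMid_flag_eq markers l hcs
    -- the last split piece is [] because s ends with the separator
    have hlast : L.getLastD [] = [] := by
      obtain ⟨ys, hys⟩ := List.getLast?_eq_some_iff.mp hends
      rw [hL, hys, List.splitOn, splitOnP_concat_true (· == '\n') '\n' (by simp) ys]
      simp
    have hLdec : L.dropLast ++ [L.getLastD []] = L := by
      rcases List.eq_nil_or_concat L with h0 | ⟨q, a, hqa⟩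
      · exact absurd h0 hLne
      · rw [hqa]; simp
    rw [hmapeq, hlast, cutMid_nil]
    conv_rhs => rw [← hLdec]
    rw [hlast, List.map_append, List.map_cons, List.map_nil, cutMid_nil]
  · -- string does not end with '\n': the strip flag is on; only the last line can differ
    have he : (!decide (s.getLast? = some '\n')) = true := by simp [hends]
    rw [he]
    obtain ⟨F, x, hFx⟩ : ∃ q a, L = q ++ [a] := by
      rcases List.eq_nil_or_concat L with h0 | ⟨q, a, hqa⟩
      · exact absurd h0 hLne
      · exact ⟨q, a, by rw [hqa, List.concat_eq_append]⟩
    have hdrop : L.dropLast = F := by rw [hFx]; simp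
    have hgl : L.getLastD [] = x := by rw [hFx]; simp
    have hxno : '\n' ∉ x := hnol x (by rw [hFx]; simp)
    rw [hdrop, hgl, hFx, List.map_append, List.map_cons, List.map_nil]
    by_cases hany : x.any (markTest markers)
    · -- the last line is cut: compare  prefix  with  rstripSpaces prefix
      set pfx := x.takeWhile (fun c => !markTest markers c) with hpref
      have hcf : cutMid markers false x = pfx := by rw [hpref]; simp [cutMid, hany]
      have hct : cutMid markers true x = rstripSpaces pfx := by rw [hpref]; simp [cutMid, hany]
      rw [hcf, hct]
      obtain ⟨sp, hdecomp, hsp⟩ := rstripSpaces_decomp pfx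
      by_cases hp' : rstripSpaces pfx = []
      · by_cases hprefnil : pfx = []
        · rw [hp', hprefnil]
        · -- pfx nonempty, all spaces: outside D_ this forces a single-line string
          have hall : pfx.all (· == ' ') = true := all_spaces_of_rstrip_nil pfx hp'
          have hpl : pfx.getLast? = some ' ' := getLast?_all_spaces pfx hprefnil hall
          have hF : F = [] := by
            by_contra hFne
            apply hnd
            rw [if_neg hends, decide_eq_true_eq]
            refine ⟨?_, ?_, ?_⟩
            · rw [hFx, List.length_append, List.length_cons, List.length_nil]
              have : 1 ≤ F.length := List.length_pos_iff.mpr hFne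
              omega
            · rw [hgl]
              unfold bad pref
              simp only [Bool.and_eq_true, bne_iff_ne, beq_iff_eq]
              exact ⟨takeWhile_ne_of_any markers x hany, by rw [← hpref]; exact hpl⟩
            · intro c hc
              rw [hgl] at hc
              unfold pref at hc
              rw [← hpref] at hc
              have := (List.all_eq_true.mp hall) c hc
              simpa using this
          subst hF
          rw [hp']
          simp only [List.map_nil, List.nil_append]
          rw [show ['\n'].intercalate [pfx] = pfx from by simp [List.intercalate],
              show ['\n'].intercalate [([] : List Char)] = [] from by simp [List.intercalate]]
          rw [if_neg (by rw [hpl]; simp), if_neg (by simp)]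
          have : pfx = [] ++ pfx := by simp
          rw [this, rstrip_append_spaces [] pfx hall]
      · -- the stripped prefix is nonempty: both outputs lack a final '\n' and rstrip to the same list
        rw [intercalate_concat, intercalate_concat]
        set Pfx := (if F.map (cutMid markers true) = [] then []
            else ['\n'].intercalate (F.map (cutMid markers true)) ++ ['\n']) with hPfx
        have hprefnil' : pfx ≠ [] := fun h => hp' (by rw [h]; rfl)
        have hlastp' : (rstripSpaces pfx).getLast? ≠ some '\n' := by
          intro hc
          have hmem : '\n' ∈ rstripSpaces pfx := by
            rcases List.eq_nil_or_concat (rstripSpaces pfx) with h0 | ⟨q, a, hqa⟩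
            · exact absurd h0 hp'
            · rw [hqa, List.concat_eq_append] at hc
              rw [List.getLast?_concat, Option.some.injEq] at hc
              rw [hqa, List.concat_eq_append, hc]
              simp
          exact hxno ((List.takeWhile_sublist _).mem (mem_rstripSpaces pfx '\n' hmem))
        have hA_last : (Pfx ++ pfx).getLast? ≠ some '\n' := by
          rw [List.getLast?_append_of_ne_nil Pfx hprefnil']
          · rw [hdecomp]
            rcases List.eq_nil_or_concat sp with rfl | ⟨q, a, rfl⟩
            · simpa using hlastp'
            · have ha : a = ' ' := by
                have := (List.all_eq_true.mp hsp) a (by simp)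
                simpa using this
              rw [List.concat_eq_append,
                show rstripSpaces pfx ++ (q ++ [a]) = (rstripSpaces pfx ++ q) ++ [a] from by simp,
                List.getLast?_concat, ha]
              simp
        have hB_last : (Pfx ++ rstripSpaces pfx).getLast? ≠ some '\n' := by
          rw [List.getLast?_append_of_ne_nil Pfx hp']
          exact hlastp'
        refine congrArg String.ofList (tailF_eq_of_rstrip _ _ hA_last hB_last ?_)
        conv_lhs => rw [hdecomp]
        rw [show Pfx ++ (rstripSpaces pfx ++ sp) = (Pfx ++ rstripSpaces pfx) ++ sp from by simp]
        exact rstrip_append_spaces (Pfx ++ rstripSpaces pfx) sp hsp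
    · -- the last line has no marker: both keep it unchanged
      have hcf : cutMid markers false x = x := by simp [cutMid, hany]
      have hct : cutMid markers true x = x := by simp [cutMid, hany]
      rw [hcf, hct]

-- ===== tightness: inside D_ the two programs always differ (length argument) =====
theorem bad_elim (markers : List String) (l : List Char) (h : bad markers l = true) :
    l.any (markTest markers) = true ∧
      (l.takeWhile (fun c => !markTest markers c)).getLast? = some ' ' := by
  unfold bad pref at h
  simp only [Bool.and_eq_true, bne_iff_ne, beq_iff_eq] at h
  refine ⟨?_, h.2⟩
  by_contra hany
  have hany' : l.any (markTest markers) = false := by simpa using hany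
  exact h.1 (takeWhile_eq_self_of_not_any markers l hany')

theorem bad_nil (markers : List String) : bad markers [] = false := by
  unfold bad pref
  simp

theorem rstripSpaces_length_le (p : List Char) : (rstripSpaces p).length ≤ p.length := by
  unfold rstripSpaces
  rw [List.length_reverse]
  calc (p.reverse.dropWhile (· == ' ')).length ≤ p.reverse.length := List.length_dropWhile_le _ _
    _ = p.length := List.length_reverse

theorem rstripSpaces_length_lt (p : List Char) (h : p.getLast? = some ' ') :
    (rstripSpaces p).length < p.length := by
  obtain ⟨q, rfl⟩ := List.getLast?_eq_some_iff.mp h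
  unfold rstripSpaces
  rw [show (q ++ [' ']).reverse = ' ' :: q.reverse from by simp, List.dropWhile_cons]
  simp only [beq_self_eq_true, if_true, List.length_reverse, List.length_append,
    List.length_singleton]
  calc (q.reverse.dropWhile (· == ' ')).length ≤ q.reverse.length := List.length_dropWhile_le _ _
    _ = q.length := List.length_reverse
    _ < q.length + 1 := Nat.lt_succ_self _

theorem rstripSpaces_eq_nil (p : List Char) (h : p.all (· == ' ') = true) :
    rstripSpaces p = [] := by
  unfold rstripSpaces
  rw [List.reverse_eq_nil_iff, List.dropWhile_eq_nil_iff]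
  intro a ha
  exact (List.all_eq_true.mp h) a (List.mem_reverse.mp ha)

theorem cutMid_len_le (markers : List String) (l : List Char) :
    (cutMid markers true l).length ≤ (cutMid markers false l).length := by
  unfold cutMid
  by_cases hany : l.any (markTest markers) <;>
    simp [hany, rstripSpaces_length_le]

theorem cutMid_len_lt (markers : List String) (l : List Char) (h : bad markers l = true) :
    (cutMid markers true l).length < (cutMid markers false l).length := by
  obtain ⟨hany, hlast⟩ := bad_elim markers l h
  unfold cutMid
  simp only [hany, if_true]
  exact rstripSpaces_length_lt _ hlast

theorem inter_len : ∀ (L : List (List Char)), L ≠ [] →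
    (['\n'].intercalate L).length + 1 = (L.map List.length).sum + L.length := by
  intro L
  induction L with
  | nil => intro h; exact absurd rfl h
  | cons x L ih =>
    intro _
    rcases L with _ | ⟨y, L'⟩
    · simp [List.intercalate]
    · rw [inter_cons x (y :: L') (by simp)]
      have := ih (by simp)
      simp only [List.length_append, List.length_cons, List.map_cons, List.sum_cons] at *
      omega

theorem inter_concat_nil (Fm : List (List Char)) (h : Fm ≠ []) :
    ['\n'].intercalate (Fm ++ [[]]) = ['\n'].intercalate Fm ++ ['\n'] := by
  rw [intercalate_concat, if_neg h]
  simp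

theorem ofList_ne (a b : List Char) (h : a.length ≠ b.length) :
    String.ofList a ≠ String.ofList b := by
  intro he
  apply h
  have := congrArg List.length (congrArg String.toList he)
  simpa [String.toList_ofList] using this

theorem rstrip_concat_nl (ys : List Char) :
    PySem.Chars.rstrip (ys ++ ['\n']) = PySem.Chars.rstrip ys := by
  simp only [PySem.Chars.rstrip, List.reverse_append, List.reverse_cons, List.reverse_nil,
    List.nil_append, List.singleton_append, List.dropWhile_cons]
  rw [show PySem.Chars.isspace '\n' = true from by decide]
  simp

theorem rstrip_length_le (x : List Char) : (PySem.Chars.rstrip x).length ≤ x.length := by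
  simp only [PySem.Chars.rstrip, List.length_reverse]
  calc (x.reverse.dropWhile PySem.Chars.isspace).length ≤ x.reverse.length :=
      List.length_dropWhile_le _ _
    _ = x.length := List.length_reverse

theorem solution_tight : Claim_exact_solution := by
  intro string markers _ hpre hd
  unfold solution solution_alt
  set s := string.toList with hs
  have hpre' : markTest markers '\n' = false ∨ '\n' ∉ s := by
    by_cases hm : "\n" ∈ markers
    · exact Or.inr (fun hsm => hpre ⟨hm, hsm⟩)
    · refine Or.inl ?_
      simp only [markTest]
      rw [show String.ofList ['\n'] = "\n" from rfl]
      simpa using hm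
  simp only []
  rw [listsA_eq markers s hpre', listsB_eq markers s, tail_eq, endswith_eq_getLast?]
  simp only [decide_eq_true_eq]
  set L : List (List Char) := List.splitOn '\n' s with hL
  have hLne : L ≠ [] := List.splitOnP_ne_nil _ _
  simp only [D_solution] at hd
  rw [← hs, ← hL] at hd
  by_cases hends : s.getLast? = some '\n'
  · -- a cut line before the final newline keeps its spaces in A, loses them in B
    rw [if_pos hends] at hd
    obtain ⟨l0, hl0L, hbad⟩ := List.any_eq_true.mp hd
    rw [hends]
    simp only [decide_true, Bool.not_true]
    have hlast : L.getLastD [] = [] := by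
      obtain ⟨ys, hys⟩ := List.getLast?_eq_some_iff.mp hends
      rw [hL, hys, List.splitOn, splitOnP_concat_true (· == '\n') '\n' (by simp) ys]
      simp
    have hLdec : L.dropLast ++ [L.getLastD []] = L := by
      rcases List.eq_nil_or_concat L with h0 | ⟨q, a, hqa⟩
      · exact absurd h0 hLne
      · rw [hqa]; simp
    have hl0F : l0 ∈ L.dropLast := by
      rw [← hLdec, hlast] at hl0L
      rcases List.mem_append.mp hl0L with h | h
      · exact h
      · rw [List.mem_singleton.mp h] at hbad
        rw [bad_nil markers] at hbad
        exact absurd hbad (by simp)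
    have hFne : L.dropLast ≠ [] := by
      intro h0
      rw [h0] at hl0F
      simp at hl0F
    rw [hlast, cutMid_nil]
    conv_rhs => rw [← hLdec, hlast]
    rw [List.map_append, List.map_cons, List.map_nil, cutMid_nil]
    have hmne : ∀ (e : Bool), L.dropLast.map (cutMid markers e) ≠ [] := by
      intro e h0
      exact hFne (List.map_eq_nil_iff.mp h0)
    rw [inter_concat_nil _ (hmne false), inter_concat_nil _ (hmne true)]
    rw [if_pos (by rw [List.getLast?_concat]), if_pos (by rw [List.getLast?_concat])]
    refine ofList_ne _ _ ?_
    simp only [List.length_append, List.length_singleton]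
    have h1 := inter_len (L.dropLast.map (cutMid markers false)) (hmne false)
    have h2 := inter_len (L.dropLast.map (cutMid markers true)) (hmne true)
    rw [List.map_map] at h1 h2
    have hsum : (L.dropLast.map (List.length ∘ cutMid markers true)).sum
        < (L.dropLast.map (List.length ∘ cutMid markers false)).sum :=
      List.sum_lt_sum _ _ (fun l _ => cutMid_len_le markers l)
        ⟨l0, hl0F, cutMid_len_lt markers l0 hbad⟩
    simp only [List.length_map] at h1 h2
    omega
  · -- no final newline: A rstrips across the final '\n', B keeps the line structure
    have he : (!decide (s.getLast? = some '\n')) = true := by simp [hends]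
    rw [he]
    rw [if_neg hends, decide_eq_true_eq] at hd
    obtain ⟨F, x, hFx⟩ : ∃ q a, L = q ++ [a] := by
      rcases List.eq_nil_or_concat L with h0 | ⟨q, a, hqa⟩
      · exact absurd h0 hLne
      · exact ⟨q, a, by rw [hqa, List.concat_eq_append]⟩
    have hdrop : L.dropLast = F := by rw [hFx]; simp
    have hgl : L.getLastD [] = x := by rw [hFx]; simp
    rw [hgl] at hd
    obtain ⟨h2, hbadx, hallp⟩ := hd
    rw [hdrop, hgl, hFx, List.map_append, List.map_cons, List.map_nil]
    set pfx := x.takeWhile (fun c => !markTest markers c) with hpfx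
    have hbe := bad_elim markers x hbadx
    have hany : x.any (markTest markers) = true := hbe.1
    have hpl : pfx.getLast? = some ' ' := by rw [hpfx]; exact hbe.2
    have hcf : cutMid markers false x = pfx := by rw [hpfx]; simp [cutMid, hany]
    have hct : cutMid markers true x = rstripSpaces pfx := by rw [hpfx]; simp [cutMid, hany]
    have hall : pfx.all (· == ' ') = true := by
      rw [List.all_eq_true]
      intro c hc
      have hc' : c ∈ pref markers x := by unfold pref; rw [hpfx] at hc; exact hc
      simp [hallp c hc']
    have hrs : rstripSpaces pfx = [] := rstripSpaces_eq_nil pfx hall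
    have hFne : F ≠ [] := by
      intro h0
      rw [hFx, h0] at h2
      simp at h2
    have hmap : F.map (cutMid markers true) ≠ [] := fun h0 => hFne (List.map_eq_nil_iff.mp h0)
    have hpfxne : pfx ≠ [] := by intro h0; rw [h0] at hpl; simp at hpl
    rw [hcf, hct, hrs, intercalate_concat, intercalate_concat]
    simp only [if_neg hmap]
    rw [List.append_nil]
    rw [if_neg (by rw [List.getLast?_append_of_ne_nil _ hpfxne, hpl]; simp),
      if_pos List.getLast?_concat]
    rw [rstrip_append_spaces _ pfx hall, rstrip_concat_nl]
    refine ofList_ne _ _ ?_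
    have hle := rstrip_length_le (['\n'].intercalate (F.map (cutMid markers true)))
    simp only [List.length_append, List.length_singleton]
    omega
theorem solution_changed : Claim_changed_solution := by
  unfold Claim_changed_solution
  refine ⟨by decide, by decide, by decide, by decide, by decide, by decide⟩
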